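-- pv_equiv track=rewrite | github.com/jcapels/PlantsSM | src/plants_sm/featurization/propythia_functions/bondcomp.py | boc_wp
-- ===== SOURCE A (Python) =====
-- def boc_wp(seq):
--     """
--     Sum of the bond composition for each type of bond: total number of bonds (including aromatic), hydrogen bond,
--     single bond and double
--
--     :param seq: protein sequence
--     :return: dictionary with number of total, hydrogen, single and double bonds
--     """
--     bb = {}
--
--     bonds_dictionary = {"G": [9, 5, 8, 1],
--                         "S": [13, 7, 12, 1],
--                         "A": [12, 7, 11, 1],
--                         "D": [15, 7, 13, 2],
--                         "N": [16, 8, 14, 2],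
--                         "T": [16, 9, 15, 1],
--                         "P": [17, 9, 16, 1],
--                         "E": [18, 9, 16, 2],
--                         "V": [18, 11, 17, 1],
--                         "Q": [19, 10, 17, 2],
--                         "M": [19, 11, 18, 1],
--                         "H": [20, 9, 17, 3],
--                         "I": [21, 13, 20, 1],
--                         "Y": [24, 11, 20, 4],
--                         "L": [21, 13, 20, 1],
--                         "K": [23, 14, 22, 1],
--                         "W": [28, 12, 23, 5],
--                         "F": [23, 11, 19, 4],
--                         "C": [25, 12, 23, 2],
--                         "R": [25, 14, 23, 2]
--                         }
--     total = 0
--     h = 0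
--     s = 0
--     d = 0
--     for aa in seq:
--
--         total += bonds_dictionary[aa][0]
--         h += bonds_dictionary[aa][1]
--         s += bonds_dictionary[aa][2]
--         d += bonds_dictionary[aa][3]
--
--     bb["total_bonds"] = total
--     bb["hydrogen_bonds"] = h
--     bb["single bonds"] = s
--     bb["double bonds"] = d
--
--     return bb
-- ===== SOURCE B (Python) =====
-- def boc_wp(seq):
--     """Aggregate-then-weight: build a frequency table of the distinct residues,
--     then form each of the four totals as an indexed weighted sum over it."""
--     bonds_dictionary = {"G": [9, 5, 8, 1], "S": [13, 7, 12, 1], "A": [12, 7, 11, 1],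
--                         "D": [15, 7, 13, 2], "N": [16, 8, 14, 2], "T": [16, 9, 15, 1],
--                         "P": [17, 9, 16, 1], "E": [18, 9, 16, 2], "V": [18, 11, 17, 1],
--                         "Q": [19, 10, 17, 2], "M": [19, 11, 18, 1], "H": [20, 9, 17, 3],
--                         "I": [21, 13, 20, 1], "Y": [24, 11, 20, 4], "L": [21, 13, 20, 1],
--                         "K": [23, 14, 22, 1], "W": [28, 12, 23, 5], "F": [23, 11, 19, 4],
--                         "C": [25, 12, 23, 2], "R": [25, 14, 23, 2]}
--     counts = {aa: seq.count(aa) for aa in set(seq)}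
--     totals = [sum(n * bonds_dictionary[aa][i] for aa, n in counts.items())
--               for i in range(4)]
--     return dict(zip(["total_bonds", "hydrogen_bonds", "single bonds", "double bonds"],
--                     totals))
-- ===== Notes on version B (the rewrite author's own statement) =====
-- stated objective: alternative
-- what changed: B replaces A's per-character four-accumulator loop by an aggregate-then-weight scheme: it builds a frequency table of the distinct residues once and computes each of the four totals as an indexed weighted sum count*weight over that table, assembling the result with zip.
import Mathlib
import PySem

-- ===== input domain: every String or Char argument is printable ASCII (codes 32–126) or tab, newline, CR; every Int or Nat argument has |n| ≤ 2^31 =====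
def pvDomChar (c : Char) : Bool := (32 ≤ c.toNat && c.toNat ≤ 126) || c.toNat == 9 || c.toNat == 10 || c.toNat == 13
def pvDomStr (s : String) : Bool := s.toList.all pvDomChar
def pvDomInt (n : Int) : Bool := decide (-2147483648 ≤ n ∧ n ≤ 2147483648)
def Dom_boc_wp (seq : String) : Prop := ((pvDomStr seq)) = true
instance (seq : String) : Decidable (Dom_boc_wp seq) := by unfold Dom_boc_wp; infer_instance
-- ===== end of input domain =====

-- B replaces A's per-character four-accumulator loop by a frequency table of the distinct
-- residues plus indexed weighted sums count*weight over that table (objective: alternative).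

-- ===== PORT A =====
-- A's bonds_dictionary lookup bonds_dictionary[aa], transliterated as a branch chain giving
-- the 4-tuple [total, hydrogen, single, double]; a residue outside the 20 keys makes the
-- Python raise KeyError — excluded by Pre_ below (the (0,0,0,0) arm is never reached there)
def bonds (c : Char) : Int × Int × Int × Int :=
  if c = 'G' then (9, 5, 8, 1)
  else if c = 'S' then (13, 7, 12, 1)
  else if c = 'A' then (12, 7, 11, 1)
  else if c = 'D' then (15, 7, 13, 2)
  else if c = 'N' then (16, 8, 14, 2)
  else if c = 'T' then (16, 9, 15, 1)
  else if c = 'P' then (17, 9, 16, 1)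
  else if c = 'E' then (18, 9, 16, 2)
  else if c = 'V' then (18, 11, 17, 1)
  else if c = 'Q' then (19, 10, 17, 2)
  else if c = 'M' then (19, 11, 18, 1)
  else if c = 'H' then (20, 9, 17, 3)
  else if c = 'I' then (21, 13, 20, 1)
  else if c = 'Y' then (24, 11, 20, 4)
  else if c = 'L' then (21, 13, 20, 1)
  else if c = 'K' then (23, 14, 22, 1)
  else if c = 'W' then (28, 12, 23, 5)
  else if c = 'F' then (23, 11, 19, 4)
  else if c = 'C' then (25, 12, 23, 2)
  else if c = 'R' then (25, 14, 23, 2)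
  else (0, 0, 0, 0)

def boc_wp (seq : String) : List (String × Int) :=
  let st := seq.toList.foldl
    (fun (acc : Int × Int × Int × Int) aa =>
      (acc.1 + (bonds aa).1, acc.2.1 + (bonds aa).2.1,
       acc.2.2.1 + (bonds aa).2.2.1, acc.2.2.2 + (bonds aa).2.2.2))
    (0, 0, 0, 0)
  [("total_bonds", st.1), ("hydrogen_bonds", st.2.1),
   ("single bonds", st.2.2.1), ("double bonds", st.2.2.2)]

-- ===== PORT B =====
-- B's bonds_dictionary kept as a dict (association list), looked up per distinct residue
def bondsTable : PySem.Dict Char (List Int) :=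
  PySem.Dict.ofList
  [('G', [9, 5, 8, 1]), ('S', [13, 7, 12, 1]), ('A', [12, 7, 11, 1]),
   ('D', [15, 7, 13, 2]), ('N', [16, 8, 14, 2]), ('T', [16, 9, 15, 1]),
   ('P', [17, 9, 16, 1]), ('E', [18, 9, 16, 2]), ('V', [18, 11, 17, 1]),
   ('Q', [19, 10, 17, 2]), ('M', [19, 11, 18, 1]), ('H', [20, 9, 17, 3]),
   ('I', [21, 13, 20, 1]), ('Y', [24, 11, 20, 4]), ('L', [21, 13, 20, 1]),
   ('K', [23, 14, 22, 1]), ('W', [28, 12, 23, 5]), ('F', [23, 11, 19, 4]),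
   ('C', [25, 12, 23, 2]), ('R', [25, 14, 23, 2])]

-- bonds_dictionary[aa] and [...][i]: for every residue Pre_ admits the key is present and
-- i ∈ range(4) is in range for its 4-element row, so the getD defaults are exact there
def boc_wp_alt (seq : String) : List (String × Int) :=
  let cs := seq.toList
  let counts : List (Char × Int) :=
    (PySem.Set.ofList cs).map (fun aa => (aa, (cs.count aa : Int)))
  let totals : List Int :=
    (PySem.List.pyRange 0 4 1).map (fun i =>
      (counts.map (fun p =>
        p.2 * PySem.List.pyGetD (PySem.Dict.getD bondsTable p.1 []) i 0)).sum)
  ["total_bonds", "hydrogen_bonds", "single bonds", "double bonds"].zip totals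

-- ===== PRECONDITION & SPEC =====
-- Pre_ excludes sequences containing a character outside the 20 amino-acid keys: A raises KeyError there (B too)
def Pre_boc_wp (seq : String) : Prop :=
  (seq.toList.all (fun c => ['G','S','A','D','N','T','P','E','V','Q','M','H','I','Y','L','K','W','F','C','R'].contains c)) = true
instance (seq : String) : Decidable (Pre_boc_wp seq) := by unfold Pre_boc_wp; infer_instance
def pvWitness_boc_wp : String := "ACDG"

def Spec_boc_wp (seq : String) (out : List (String × Int)) : Prop := out = boc_wp_alt seq
instance (seq : String) (out : List (String × Int)) : Decidable (Spec_boc_wp seq out) := by unfold Spec_boc_wp; infer_instance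

-- ===== CLAIM =====
def Claim_equal_boc_wp : Prop := ∀ (seq : String), Dom_boc_wp seq → Pre_boc_wp seq → Spec_boc_wp seq (boc_wp seq)

-- ===== LEMMAS AND PROOFS =====

-- a 4-tuple accumulator loop splits into four scalar loops
theorem foldl4_split (cs : List Char) (f g h k : Char → Int) (a b c d : Int) :
    cs.foldl (fun acc aa => (acc.1 + f aa, acc.2.1 + g aa, acc.2.2.1 + h aa, acc.2.2.2 + k aa)) (a, b, c, d)
      = (cs.foldl (fun x aa => x + f aa) a, cs.foldl (fun x aa => x + g aa) b,
         cs.foldl (fun x aa => x + h aa) c, cs.foldl (fun x aa => x + k aa) d) := by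
  induction cs generalizing a b c d with
  | nil => rfl
  | cons x xs ih => simp [List.foldl_cons, ih]

-- A's per-character accumulation equals a count-weighted sum over the distinct characters
theorem foldl_eq_weighted_sum (cs : List Char) (f : Char → Int) :
    cs.foldl (fun x aa => x + f aa) 0
      = ((PySem.Set.ofList cs).map (fun aa => ((cs.count aa : Int) * f aa))).sum := by
  have h1 : cs.foldl (fun x aa => x + f aa) 0 = (cs.map f).sum := by
    rw [PySem.List.foldl_add]; simp
  have hnd : (PySem.Set.ofList cs).Nodup := PySem.Set.nodup_ofList cs
  have htf : (PySem.Set.ofList cs).toFinset = cs.toFinset := by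
    ext x; simp [List.mem_toFinset, PySem.Set.mem_ofList]
  calc cs.foldl (fun x aa => x + f aa) 0
      = (cs.map f).sum := h1
    _ = ∑ m ∈ cs.toFinset, cs.count m • f m := Finset.sum_list_map_count cs f
    _ = ∑ m ∈ (PySem.Set.ofList cs).toFinset, ((cs.count m : Int) * f m) := by
        rw [htf]; apply Finset.sum_congr rfl; intro m _; simp
    _ = ((PySem.Set.ofList cs).map (fun aa => ((cs.count aa : Int) * f aa))).sum :=
        List.sum_toFinset _ hnd

-- on each of the 20 admitted residues B's table row agrees with A's branch chain
theorem table_agrees : ∀ c ∈ ['G','S','A','D','N','T','P','E','V','Q','M','H','I','Y','L','K','W','F','C','R'],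
    PySem.List.pyGetD (PySem.Dict.getD bondsTable c []) 0 0 = (bonds c).1 ∧
    PySem.List.pyGetD (PySem.Dict.getD bondsTable c []) 1 0 = (bonds c).2.1 ∧
    PySem.List.pyGetD (PySem.Dict.getD bondsTable c []) 2 0 = (bonds c).2.2.1 ∧
    PySem.List.pyGetD (PySem.Dict.getD bondsTable c []) 3 0 = (bonds c).2.2.2 := by
  intro c hc
  fin_cases hc <;> decide

-- ===== VERDICT =====
theorem boc_wp_spec : Claim_equal_boc_wp := by
  intro seq _ hpre
  unfold Spec_boc_wp boc_wp boc_wp_alt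
  rw [foldl4_split]
  have hrange : PySem.List.pyRange 0 4 1 = [0, 1, 2, 3] := by decide
  simp only [hrange, List.map_cons, List.map_nil, List.map_map, List.zip_cons_cons, List.zip_nil_right]
  rw [foldl_eq_weighted_sum, foldl_eq_weighted_sum, foldl_eq_weighted_sum, foldl_eq_weighted_sum]
  have hmem : ∀ aa ∈ PySem.Set.ofList seq.toList,
      aa ∈ ['G','S','A','D','N','T','P','E','V','Q','M','H','I','Y','L','K','W','F','C','R'] := by
    intro aa ha
    have haa := (PySem.Set.mem_ofList _ _).mp ha
    have := List.all_eq_true.mp hpre aa haa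
    simpa using this
  have key : ∀ (fA : Char → Int) (i : Int),
      (∀ aa ∈ PySem.Set.ofList seq.toList,
        PySem.List.pyGetD (PySem.Dict.getD bondsTable aa []) i 0 = fA aa) →
      (List.map (fun aa => ((seq.toList.count aa : Int) * fA aa)) (PySem.Set.ofList seq.toList)).sum
        = (List.map ((fun p : Char × Int => p.2 * PySem.List.pyGetD (PySem.Dict.getD bondsTable p.1 []) i 0)
            ∘ fun aa => (aa, (seq.toList.count aa : Int))) (PySem.Set.ofList seq.toList)).sum := by
    intro fA i hf
    apply congrArg List.sum
    apply List.map_congr_left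
    intro aa ha
    simp only [Function.comp]
    rw [hf aa ha, mul_comm]
  rw [key (fun aa => (bonds aa).1) 0 (fun aa ha => (table_agrees aa (hmem aa ha)).1),
      key (fun aa => (bonds aa).2.1) 1 (fun aa ha => (table_agrees aa (hmem aa ha)).2.1),
      key (fun aa => (bonds aa).2.2.1) 2 (fun aa ha => (table_agrees aa (hmem aa ha)).2.2.1),
      key (fun aa => (bonds aa).2.2.2) 3 (fun aa ha => (table_agrees aa (hmem aa ha)).2.2.2)]
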